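-- pv_equiv track=rewrite | github.com/Majkell99/Moje-Programy | Python/AplikacjeTekstowe.py | PD_podciagi
-- ===== SOURCE A (Python) =====
-- def PD_podciagi(wzorzec, i, tekst, j):
--     D = [[0 for _ in range(j)] for _ in range(i)]
--     r = [['X' for _ in range(j)] for _ in range(i)]
--     for n in range(i):
--         for m in range(j):
--             if n != 0 and m == 0:
--                 r[n][m] = 'D'
--
--     for n in range(i):
--         D[n][0] = n
--
--     for n in range(1, i):
--         for m in range(1, j):
--             koszt_wstawienia = 1 + D[n][m-1]
--             koszt_usuniecia = 1 + D[n-1][m]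
--             koszt_wymiany = D[n-1][m-1] + (wzorzec[n] != tekst[m])
--
--             min_koszt = min(koszt_wstawienia, koszt_usuniecia, koszt_wymiany)
--             D[n][m] = min_koszt
--             if min_koszt == koszt_wstawienia:
--                 r[n][m] = 'I'
--             elif min_koszt == koszt_usuniecia:
--                 r[n][m] = 'D'
--             else:
--                 if min_koszt == D[n-1][m-1]:
--                     r[n][m] = 'M'
--                 else:
--                     r[n][m] = 'S'
--
--     minimum_last_wiersz = min(D[i-1][:])
--     indeks_last = D[i-1].index(minimum_last_wiersz)
--     koszt = D[i-1][indeks_last]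
--
--     return koszt, indeks_last
-- ===== SOURCE B (Python) =====
-- def PD_podciagi(wzorzec, i, tekst, j):
--     # top-down memoized evaluation of the cost recurrence (no DP matrix, no
--     # traceback table); the memo is filled by an explicit work stack, so no
--     # recursion depth limit applies.
--     memo = {}
--
--     def cost(n, m):
--         stack = [(n, m)]
--         while stack:
--             a, b = stack[-1]
--             if (a, b) in memo:
--                 stack.pop()
--             elif b <= 0:
--                 memo[(a, b)] = a
--                 stack.pop()
--             elif a <= 0:
--                 memo[(a, b)] = 0
--                 stack.pop()
--             elif (a, b - 1) not in memo:
--                 stack.append((a, b - 1))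
--             elif (a - 1, b) not in memo:
--                 stack.append((a - 1, b))
--             elif (a - 1, b - 1) not in memo:
--                 stack.append((a - 1, b - 1))
--             else:
--                 memo[(a, b)] = min(1 + memo[(a, b - 1)],
--                                    1 + memo[(a - 1, b)],
--                                    memo[(a - 1, b - 1)] + (wzorzec[a] != tekst[b]))
--                 stack.pop()
--         return memo[(n, m)]
--
--     last_row = [cost(i - 1, m) for m in range(j)]
--     best = min(last_row)
--     return best, last_row.index(best)
-- ===== Notes on version B (the rewrite author's own statement) =====
-- stated objective: alternative
-- what changed: B abandons A's bottom-up construction of the full i x j cost matrix (plus an unused traceback matrix) for demand-driven top-down memoized evaluation of the cost recurrence: each last-row cell is computed on demand via an explicit work stack over a memo dictionary.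
import Mathlib
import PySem

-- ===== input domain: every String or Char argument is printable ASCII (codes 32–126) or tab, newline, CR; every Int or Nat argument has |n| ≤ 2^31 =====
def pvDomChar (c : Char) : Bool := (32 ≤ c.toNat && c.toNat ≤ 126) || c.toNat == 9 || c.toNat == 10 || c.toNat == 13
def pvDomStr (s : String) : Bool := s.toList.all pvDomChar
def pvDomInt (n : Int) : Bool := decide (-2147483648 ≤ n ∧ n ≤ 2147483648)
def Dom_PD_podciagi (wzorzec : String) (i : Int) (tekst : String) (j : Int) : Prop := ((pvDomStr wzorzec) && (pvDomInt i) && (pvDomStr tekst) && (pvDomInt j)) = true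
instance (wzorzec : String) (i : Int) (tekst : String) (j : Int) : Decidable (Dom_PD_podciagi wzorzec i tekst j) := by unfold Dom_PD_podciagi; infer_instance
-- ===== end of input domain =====

-- B replaces A's bottom-up i×j cost matrix (plus unused traceback matrix) by demand-driven
-- top-down memoized evaluation of the same cost recurrence (explicit work stack + memo dict);
-- same return value wherever A returns normally.

-- ===== PORT A =====
-- Matrix-level helpers for port A: Python's O(1) list cell assignment D[n] = v / read D[n] on the
-- outer list, ported as Array update; exact for 0 ≤ n < len (every matrix index A uses inside Pre_).
def pvAGet {r : Type} (xs : Array r) (i : Int) (d : r) : r := xs.getD i.toNat d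
def pvASet {r : Type} (xs : Array r) (i : Int) (v : r) : Array r := xs.setIfInBounds i.toNat v

def PD_podciagi (wzorzec : String) (i : Int) (tekst : String) (j : Int) : Int × Int :=
  -- D = [[0 for _ in range(j)] for _ in range(i)]
  let D : Array (List Int) :=
    ((PySem.List.pyRange 0 i 1).map (fun _ => (PySem.List.pyRange 0 j 1).map (fun _ => (0 : Int)))).toArray
  -- r = [['X' for _ in range(j)] for _ in range(i)]
  let r : Array (List Char) :=
    ((PySem.List.pyRange 0 i 1).map (fun _ => (PySem.List.pyRange 0 j 1).map (fun _ => 'X'))).toArray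
  -- for n in range(i): for m in range(j): if n != 0 and m == 0: r[n][m] = 'D'
  let r := (PySem.List.pyRange 0 i 1).foldl (fun r n =>
      (PySem.List.pyRange 0 j 1).foldl (fun r m =>
        if n ≠ 0 ∧ m = 0 then
          pvASet r n (PySem.List.pySetD (pvAGet r n []) m 'D')
        else r) r) r
  -- for n in range(i): D[n][0] = n
  let D := (PySem.List.pyRange 0 i 1).foldl (fun D n =>
      pvASet D n (PySem.List.pySetD (pvAGet D n []) 0 n)) D
  -- for n in range(1, i): for m in range(1, j): … (updates both D and r)
  let Dr := (PySem.List.pyRange 1 i 1).foldl (fun Dr n =>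
      (PySem.List.pyRange 1 j 1).foldl (fun Dr m =>
        let koszt_wstawienia : Int :=
          1 + PySem.List.pyGetD (pvAGet Dr.1 n []) (m - 1) 0
        let koszt_usuniecia : Int :=
          1 + PySem.List.pyGetD (pvAGet Dr.1 (n - 1) []) m 0
        let koszt_wymiany : Int :=
          PySem.List.pyGetD (pvAGet Dr.1 (n - 1) []) (m - 1) 0 +
            (if (PySem.Str.pyGet? wzorzec n).getD ' ' ≠ (PySem.Str.pyGet? tekst m).getD ' '
             then 1 else 0)
        let min_koszt := min (min koszt_wstawienia koszt_usuniecia) koszt_wymiany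
        let D' := pvASet Dr.1 n
          (PySem.List.pySetD (pvAGet Dr.1 n []) m min_koszt)
        let r' :=
          if min_koszt = koszt_wstawienia then
            pvASet Dr.2 n (PySem.List.pySetD (pvAGet Dr.2 n []) m 'I')
          else if min_koszt = koszt_usuniecia then
            pvASet Dr.2 n (PySem.List.pySetD (pvAGet Dr.2 n []) m 'D')
          else if min_koszt = PySem.List.pyGetD (pvAGet Dr.1 (n - 1) []) (m - 1) 0 then
            pvASet Dr.2 n (PySem.List.pySetD (pvAGet Dr.2 n []) m 'M')
          else
            pvASet Dr.2 n (PySem.List.pySetD (pvAGet Dr.2 n []) m 'S')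
        (D', r')) Dr) (D, r)
  -- minimum_last_wiersz = min(D[i-1][:]); indeks_last = D[i-1].index(min…); koszt = D[i-1][indeks_last]
  let lastRow := pvAGet Dr.1 (i - 1) []
  let minimum := (PySem.List.min? lastRow (fun x => x)).getD 0
  let indeks : Int := ((PySem.List.index? lastRow minimum).getD 0 : Nat)
  let koszt := PySem.List.pyGetD lastRow indeks 0
  (koszt, indeks)

-- ===== PORT B =====
-- B-side helpers: pvChi = (wzorzec[a] != tekst[b]) as 0/1; bFuel = fuel making the work-stack
-- loop total (fuel only totalizes the loop, it never changes a computed value); bLoop = the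
-- 'while stack:' loop of Source B, step for step; bStep = one iteration of the last_row comprehension.
def pvChi (wz tk : String) (a b : Int) : Int :=
  if (PySem.Str.pyGet? wz a).getD ' ' ≠ (PySem.Str.pyGet? tk b).getD ' ' then 1 else 0

def bFuel : Nat → Nat
  | 0 => 1
  | k + 1 => 3 * bFuel k + 4

def bLoop (wz tk : String) : Nat → List (Int × Int) → PySem.Dict (Int × Int) Int → PySem.Dict (Int × Int) Int
  | 0, _, memo => memo
  | _ + 1, [], memo => memo
  | f + 1, (a, b) :: rest, memo =>
    if (memo.get? (a, b)).isSome then bLoop wz tk f rest memo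
    else if b ≤ 0 then bLoop wz tk f rest (memo.insert (a, b) a)
    else if a ≤ 0 then bLoop wz tk f rest (memo.insert (a, b) 0)
    else if (memo.get? (a, b - 1)).isNone then bLoop wz tk f ((a, b - 1) :: (a, b) :: rest) memo
    else if (memo.get? (a - 1, b)).isNone then bLoop wz tk f ((a - 1, b) :: (a, b) :: rest) memo
    else if (memo.get? (a - 1, b - 1)).isNone then bLoop wz tk f ((a - 1, b - 1) :: (a, b) :: rest) memo
    else bLoop wz tk f rest (memo.insert (a, b)
      (min (min (1 + memo.getD (a, b - 1) 0) (1 + memo.getD (a - 1, b) 0))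
           (memo.getD (a - 1, b - 1) 0 + pvChi wz tk a b)))

def bStep (wz tk : String) (a : Int) (p : PySem.Dict (Int × Int) Int × List Int) (m : Int) :
    PySem.Dict (Int × Int) Int × List Int :=
  let memo' := bLoop wz tk (bFuel (a.toNat + m.toNat)) [(a, m)] p.1
  (memo', p.2 ++ [memo'.getD (a, m) 0])

def PD_podciagi_alt (wzorzec : String) (i : Int) (tekst : String) (j : Int) : Int × Int :=
  -- last_row = [cost(i - 1, m) for m in range(j)]  (memo shared across the calls)
  let res := (PySem.List.pyRange 0 j 1).foldl (bStep wzorzec tekst (i - 1)) (PySem.Dict.empty, [])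
  -- best = min(last_row); return best, last_row.index(best)
  let best := (PySem.List.min? res.2 (fun x => x)).getD 0
  (best, ((PySem.List.index? res.2 best).getD 0 : Nat))

-- ===== PRECONDITION & SPEC =====
-- Pre_ is exactly where the Python A returns normally: it needs i ≥ 1 (else D[i-1] → IndexError),
-- j ≥ 1 (else D[n][0]=n or min([]) raises), and — when both loops run — i ≤ len(wzorzec) and
-- j ≤ len(tekst) (else wzorzec[n]/tekst[m] → IndexError).
def Pre_PD_podciagi (wzorzec : String) (i : Int) (tekst : String) (j : Int) : Prop :=
  1 ≤ i ∧ 1 ≤ j ∧ (i = 1 ∨ j = 1 ∨ (i ≤ PySem.Str.len wzorzec ∧ j ≤ PySem.Str.len tekst))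
instance (wzorzec : String) (i : Int) (tekst : String) (j : Int) : Decidable (Pre_PD_podciagi wzorzec i tekst j) := by unfold Pre_PD_podciagi; infer_instance
def pvWitness_PD_podciagi : String × Int × String × Int := ("ab", 2, "ba", 2)

def Spec_PD_podciagi (wzorzec : String) (i : Int) (tekst : String) (j : Int) (out : Int × Int) : Prop := out = PD_podciagi_alt wzorzec i tekst j
instance (wzorzec : String) (i : Int) (tekst : String) (j : Int) (out : Int × Int) : Decidable (Spec_PD_podciagi wzorzec i tekst j out) := by unfold Spec_PD_podciagi; infer_instance

-- ===== CLAIM (what is proved, stated in full; the proofs are below) =====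
def Claim_equal_PD_podciagi : Prop := ∀ (wzorzec : String) (i : Int) (tekst : String) (j : Int), Dom_PD_podciagi wzorzec i tekst j → Pre_PD_podciagi wzorzec i tekst j → Spec_PD_podciagi wzorzec i tekst j (PD_podciagi wzorzec i tekst j)

-- ===== LEMMAS AND PROOFS =====

-- the shared cost recurrence both programs compute: cSpec a b = D[a][b] / = memo[(a,b)]
def cSpec (wz tk : String) (a b : Int) : Int :=
  if _hb : b ≤ 0 then a
  else if _ha : a ≤ 0 then 0
  else min (min (1 + cSpec wz tk a (b - 1)) (1 + cSpec wz tk (a - 1) b))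
           (cSpec wz tk (a - 1) (b - 1) + pvChi wz tk a b)
termination_by (a.toNat + b.toNat)
decreasing_by all_goals omega

theorem cSpec_b_le (wz tk : String) (a b : Int) (h : b ≤ 0) : cSpec wz tk a b = a := by
  rw [cSpec, dif_pos h]

theorem cSpec_a_le (wz tk : String) (a b : Int) (hb : ¬ b ≤ 0) (ha : a ≤ 0) :
    cSpec wz tk a b = 0 := by
  rw [cSpec, dif_neg hb, dif_pos ha]

theorem cSpec_rec (wz tk : String) (a b : Int) (hb : ¬ b ≤ 0) (ha : ¬ a ≤ 0) :
    cSpec wz tk a b = min (min (1 + cSpec wz tk a (b - 1)) (1 + cSpec wz tk (a - 1) b))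
      (cSpec wz tk (a - 1) (b - 1) + pvChi wz tk a b) := by
  rw [cSpec, dif_neg hb, dif_neg ha]

-- memo invariants
def pvGood (wz tk : String) (memo : PySem.Dict (Int × Int) Int) : Prop :=
  ∀ key v, memo.get? key = some v → v = cSpec wz tk key.1 key.2

def pvMono (m m' : PySem.Dict (Int × Int) Int) : Prop :=
  ∀ key v, m.get? key = some v → m'.get? key = some v

def pvNew (m m' : PySem.Dict (Int × Int) Int) (n : Nat) : Prop :=
  ∀ key v, m'.get? key = some v → m.get? key = some v ∨ key.1.toNat + key.2.toNat ≤ n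

def pvMissing (memo : PySem.Dict (Int × Int) Int) (a b : Int) : Nat :=
  (if memo.get? (a, b - 1) = none then 1 else 0) +
  (if memo.get? (a - 1, b) = none then 1 else 0) +
  (if memo.get? (a - 1, b - 1) = none then 1 else 0)

-- fuel budget: pvUsed k t = t * (bFuel k + 1) + 1, kept in recursive form for linear arithmetic
def pvUsed (k : Nat) : Nat → Nat
  | 0 => 1
  | t + 1 => bFuel k + 1 + pvUsed k t

-- the shape of a resolved top-of-stack cell
def pvOut (wz tk : String) (a b : Int) (memo : PySem.Dict (Int × Int) Int)
    (rest : List (Int × Int)) (f used : Nat) : Prop :=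
  ∃ f' memo', bLoop wz tk f ((a, b) :: rest) memo = bLoop wz tk f' rest memo'
    ∧ f - used ≤ f' ∧ f' ≤ f
    ∧ pvGood wz tk memo' ∧ pvMono memo memo' ∧ pvNew memo memo' (a.toNat + b.toNat)
    ∧ memo'.get? (a, b) = some (cSpec wz tk a b)

theorem bLoop_nil (wz tk : String) (f : Nat) (memo : PySem.Dict (Int × Int) Int) :
    bLoop wz tk f [] memo = memo := by
  cases f <;> rfl

theorem bLoop_succ (wz tk : String) (f : Nat) (a b : Int) (rest : List (Int × Int))
    (memo : PySem.Dict (Int × Int) Int) :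
    bLoop wz tk (f + 1) ((a, b) :: rest) memo =
      if (memo.get? (a, b)).isSome then bLoop wz tk f rest memo
      else if b ≤ 0 then bLoop wz tk f rest (memo.insert (a, b) a)
      else if a ≤ 0 then bLoop wz tk f rest (memo.insert (a, b) 0)
      else if (memo.get? (a, b - 1)).isNone then bLoop wz tk f ((a, b - 1) :: (a, b) :: rest) memo
      else if (memo.get? (a - 1, b)).isNone then bLoop wz tk f ((a - 1, b) :: (a, b) :: rest) memo
      else if (memo.get? (a - 1, b - 1)).isNone then bLoop wz tk f ((a - 1, b - 1) :: (a, b) :: rest) memo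
      else bLoop wz tk f rest (memo.insert (a, b)
        (min (min (1 + memo.getD (a, b - 1) 0) (1 + memo.getD (a - 1, b) 0))
             (memo.getD (a - 1, b - 1) 0 + pvChi wz tk a b))) := rfl

theorem bFuel_pos (k : Nat) : 1 ≤ bFuel k := by
  cases k <;> simp [bFuel]

theorem pvGood_insert (wz tk : String) (memo : PySem.Dict (Int × Int) Int) (a b : Int)
    (h : pvGood wz tk memo) :
    pvGood wz tk (memo.insert (a, b) (cSpec wz tk a b)) := by
  intro key v hv
  rw [PySem.Dict.get?_insert] at hv
  split_ifs at hv with he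
  · cases Option.some.inj hv; rw [he]
  · exact h key v hv

theorem pvMono_insert (memo : PySem.Dict (Int × Int) Int) (k : Int × Int) (v : Int)
    (hk : memo.get? k = none) : pvMono memo (memo.insert k v) := by
  intro key w h
  rw [PySem.Dict.get?_insert]
  split_ifs with he
  · rw [he] at h; rw [h] at hk; cases hk
  · exact h

theorem pvNew_insert (memo : PySem.Dict (Int × Int) Int) (k : Int × Int) (v : Int) (n : Nat)
    (hn : k.1.toNat + k.2.toNat ≤ n) : pvNew memo (memo.insert k v) n := by
  intro key w h
  rw [PySem.Dict.get?_insert] at h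
  split_ifs at h with he
  · right; rw [he]; exact hn
  · left; exact h

theorem pvMono_trans {m1 m2 m3 : PySem.Dict (Int × Int) Int}
    (h1 : pvMono m1 m2) (h2 : pvMono m2 m3) : pvMono m1 m3 :=
  fun key v h => h2 key v (h1 key v h)

theorem pvNew_trans {m1 m2 m3 : PySem.Dict (Int × Int) Int} {n1 n2 n : Nat}
    (h1 : pvNew m1 m2 n1) (h2 : pvNew m2 m3 n2) (hn1 : n1 ≤ n) (hn2 : n2 ≤ n) :
    pvNew m1 m3 n := by
  intro key v h
  rcases h2 key v h with h' | h'
  · rcases h1 key v h' with h'' | h''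
    · exact Or.inl h''
    · exact Or.inr (le_trans h'' hn1)
  · exact Or.inr (le_trans h' hn2)

theorem pvOut_weaken (wz tk : String) (a b : Int) (memo : PySem.Dict (Int × Int) Int)
    (rest : List (Int × Int)) (f used used' : Nat) (h : pvOut wz tk a b memo rest f used)
    (hu : used ≤ used') : pvOut wz tk a b memo rest f used' := by
  obtain ⟨f', memo', heq, h1, h2, h3, h4, h5, h6⟩ := h
  exact ⟨f', memo', heq, by omega, h2, h3, h4, h5, h6⟩

theorem pvTerm_le (memo memo' : PySem.Dict (Int × Int) Int) (hmono : pvMono memo memo')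
    (d : Int × Int) :
    (if memo'.get? d = none then (1 : Nat) else 0) ≤ (if memo.get? d = none then 1 else 0) := by
  by_cases hx : memo.get? d = none
  · rw [if_pos hx]; split <;> omega
  · obtain ⟨v, hv⟩ := Option.ne_none_iff_exists'.mp hx
    rw [hmono d v hv]
    simp [hx]

-- one iteration that memoizes (a,b) and pops: the three direct insert cases
theorem pvOut_of_insert (wz tk : String) (a b : Int) (rest : List (Int × Int))
    (memo : PySem.Dict (Int × Int) Int) (f : Nat) (v : Int)
    (hnone : memo.get? (a, b) = none) (hGood : pvGood wz tk memo)
    (hv : v = cSpec wz tk a b)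
    (heq : bLoop wz tk (f + 1) ((a, b) :: rest) memo = bLoop wz tk f rest (memo.insert (a, b) v)) :
    pvOut wz tk a b memo rest (f + 1) 1 := by
  refine ⟨f, memo.insert (a, b) v, heq, by omega, by omega, ?_, ?_, ?_, ?_⟩
  · rw [hv]; exact pvGood_insert wz tk memo a b hGood
  · exact pvMono_insert memo (a, b) v hnone
  · exact pvNew_insert memo (a, b) v _ le_rfl
  · rw [PySem.Dict.get?_insert_self, hv]

theorem pvOut_of_mem (wz tk : String) (a b : Int) (rest : List (Int × Int))
    (memo : PySem.Dict (Int × Int) Int) (f : Nat) (v : Int)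
    (hsome : memo.get? (a, b) = some v) (hGood : pvGood wz tk memo) :
    pvOut wz tk a b memo rest (f + 1) 1 := by
  refine ⟨f, memo, ?_, by omega, by omega, hGood, fun _ _ h => h, fun _ _ h => Or.inl h, ?_⟩
  · rw [bLoop_succ, if_pos (by rw [hsome]; rfl)]
  · rw [hsome, hGood (a, b) v hsome]

-- the inner revisit loop of one unresolved cell (a,b): each round resolves one missing
-- dependency via IH, until all three are present and (a,b) is memoized
theorem pvVisits (wz tk : String) (k : Nat)
    (IH : ∀ a b : Int, a.toNat + b.toNat ≤ k → ∀ memo rest f, pvGood wz tk memo → bFuel k ≤ f →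
      pvOut wz tk a b memo rest f (bFuel k))
    (a b : Int) (ha : 1 ≤ a) (hb : 1 ≤ b) (hm : a.toNat + b.toNat ≤ k + 1) :
    ∀ t : Nat, ∀ memo rest f, pvGood wz tk memo → memo.get? (a, b) = none →
      pvMissing memo a b ≤ t → pvUsed k t ≤ f →
      pvOut wz tk a b memo rest f (pvUsed k t) := by
  intro t
  induction t with
  | zero =>
    intro memo rest f hg hnone hmiss hf
    have hmiss' := hmiss
    unfold pvMissing at hmiss'
    have h1 : memo.get? (a, b - 1) ≠ none := by intro h; rw [if_pos h] at hmiss'; omega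
    have h2 : memo.get? (a - 1, b) ≠ none := by intro h; rw [if_pos h] at hmiss'; omega
    have h3 : memo.get? (a - 1, b - 1) ≠ none := by intro h; rw [if_pos h] at hmiss'; omega
    obtain ⟨v1, hv1⟩ := Option.ne_none_iff_exists'.mp h1
    obtain ⟨v2, hv2⟩ := Option.ne_none_iff_exists'.mp h2
    obtain ⟨v3, hv3⟩ := Option.ne_none_iff_exists'.mp h3
    obtain ⟨f0, rfl⟩ : ∃ f0, f = f0 + 1 := ⟨f - 1, by have hu : pvUsed k 0 = 1 := rfl; omega⟩
    have hveq : min (min (1 + memo.getD (a, b - 1) 0) (1 + memo.getD (a - 1, b) 0))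
        (memo.getD (a - 1, b - 1) 0 + pvChi wz tk a b) = cSpec wz tk a b := by
      rw [PySem.Dict.getD_eq_get?_getD memo (a, b - 1) 0, hv1,
        PySem.Dict.getD_eq_get?_getD memo (a - 1, b) 0, hv2,
        PySem.Dict.getD_eq_get?_getD memo (a - 1, b - 1) 0, hv3]
      simp only [Option.getD_some]
      rw [hg (a, b - 1) v1 hv1, hg (a - 1, b) v2 hv2, hg (a - 1, b - 1) v3 hv3,
        cSpec_rec wz tk a b (by omega) (by omega)]
    apply pvOut_of_insert wz tk a b rest memo f0 _ hnone hg hveq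
    rw [bLoop_succ, if_neg (by rw [hnone]; simp), if_neg (by omega), if_neg (by omega),
      if_neg (by rw [hv1]; simp), if_neg (by rw [hv2]; simp), if_neg (by rw [hv3]; simp)]
  | succ t iht =>
    intro memo rest f hg hnone hmiss hf
    have hu : pvUsed k (t + 1) = bFuel k + 1 + pvUsed k t := rfl
    by_cases h1 : memo.get? (a, b - 1) = none
    · -- resolve the first dependency, then revisit
      obtain ⟨f0, rfl⟩ : ∃ f0, f = f0 + 1 := ⟨f - 1, by have := bFuel_pos k; omega⟩
      have hstep : bLoop wz tk (f0 + 1) ((a, b) :: rest) memo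
          = bLoop wz tk f0 ((a, b - 1) :: (a, b) :: rest) memo := by
        rw [bLoop_succ, if_neg (by rw [hnone]; simp), if_neg (by omega), if_neg (by omega),
          if_pos (by rw [h1]; rfl)]
      obtain ⟨f1, memo1, heq1, hf1lo, hf1hi, hg1, hmono1, hnew1, hget1⟩ :=
        IH a (b - 1) (by omega) memo ((a, b) :: rest) f0 hg (by omega)
      have hnone1 : memo1.get? (a, b) = none := by
        cases hx : memo1.get? (a, b) with
        | none => rfl
        | some v =>
          rcases hnew1 (a, b) v hx with h' | h'
          · rw [hnone] at h'; cases h'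
          · simp at h'; omega
      have hm1 : pvMissing memo1 a b ≤ t := by
        have e1 : (if memo1.get? (a, b - 1) = none then (1 : Nat) else 0) = 0 := by
          rw [hget1]; simp
        have e2 := pvTerm_le memo memo1 hmono1 (a - 1, b)
        have e3 := pvTerm_le memo memo1 hmono1 (a - 1, b - 1)
        unfold pvMissing at hmiss ⊢
        rw [if_pos h1] at hmiss
        omega
      obtain ⟨f2, memo2, heq2, hf2lo, hf2hi, hg2, hmono2, hnew2, hget2⟩ :=
        iht memo1 rest f1 hg1 hnone1 hm1 (by omega)
      exact ⟨f2, memo2, by rw [hstep, heq1, heq2], by omega, by omega, hg2,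
        pvMono_trans hmono1 hmono2, pvNew_trans hnew1 hnew2 (by omega) le_rfl, hget2⟩
    · obtain ⟨w1, hw1⟩ := Option.ne_none_iff_exists'.mp h1
      by_cases h2 : memo.get? (a - 1, b) = none
      · -- resolve the second dependency, then revisit
        obtain ⟨f0, rfl⟩ : ∃ f0, f = f0 + 1 := ⟨f - 1, by have := bFuel_pos k; omega⟩
        have hstep : bLoop wz tk (f0 + 1) ((a, b) :: rest) memo
            = bLoop wz tk f0 ((a - 1, b) :: (a, b) :: rest) memo := by
          rw [bLoop_succ, if_neg (by rw [hnone]; simp), if_neg (by omega), if_neg (by omega),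
            if_neg (by rw [hw1]; simp), if_pos (by rw [h2]; rfl)]
        obtain ⟨f1, memo1, heq1, hf1lo, hf1hi, hg1, hmono1, hnew1, hget1⟩ :=
          IH (a - 1) b (by omega) memo ((a, b) :: rest) f0 hg (by omega)
        have hnone1 : memo1.get? (a, b) = none := by
          cases hx : memo1.get? (a, b) with
          | none => rfl
          | some v =>
            rcases hnew1 (a, b) v hx with h' | h'
            · rw [hnone] at h'; cases h'
            · simp at h'; omega
        have hm1 : pvMissing memo1 a b ≤ t := by
          have e1 : (if memo1.get? (a, b - 1) = none then (1 : Nat) else 0) = 0 := by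
            rw [hmono1 (a, b - 1) w1 hw1]; simp
          have e2 : (if memo1.get? (a - 1, b) = none then (1 : Nat) else 0) = 0 := by
            rw [hget1]; simp
          have e3 := pvTerm_le memo memo1 hmono1 (a - 1, b - 1)
          unfold pvMissing at hmiss ⊢
          rw [if_neg h1, if_pos h2] at hmiss
          omega
        obtain ⟨f2, memo2, heq2, hf2lo, hf2hi, hg2, hmono2, hnew2, hget2⟩ :=
          iht memo1 rest f1 hg1 hnone1 hm1 (by omega)
        exact ⟨f2, memo2, by rw [hstep, heq1, heq2], by omega, by omega, hg2,
          pvMono_trans hmono1 hmono2, pvNew_trans hnew1 hnew2 (by omega) le_rfl, hget2⟩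
      · obtain ⟨w2, hw2⟩ := Option.ne_none_iff_exists'.mp h2
        by_cases h3 : memo.get? (a - 1, b - 1) = none
        · -- resolve the third dependency, then revisit
          obtain ⟨f0, rfl⟩ : ∃ f0, f = f0 + 1 := ⟨f - 1, by have := bFuel_pos k; omega⟩
          have hstep : bLoop wz tk (f0 + 1) ((a, b) :: rest) memo
              = bLoop wz tk f0 ((a - 1, b - 1) :: (a, b) :: rest) memo := by
            rw [bLoop_succ, if_neg (by rw [hnone]; simp), if_neg (by omega), if_neg (by omega),
              if_neg (by rw [hw1]; simp), if_neg (by rw [hw2]; simp), if_pos (by rw [h3]; rfl)]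
          obtain ⟨f1, memo1, heq1, hf1lo, hf1hi, hg1, hmono1, hnew1, hget1⟩ :=
            IH (a - 1) (b - 1) (by omega) memo ((a, b) :: rest) f0 hg (by omega)
          have hnone1 : memo1.get? (a, b) = none := by
            cases hx : memo1.get? (a, b) with
            | none => rfl
            | some v =>
              rcases hnew1 (a, b) v hx with h' | h'
              · rw [hnone] at h'; cases h'
              · simp at h'; omega
          have hm1 : pvMissing memo1 a b ≤ t := by
            have e1 : (if memo1.get? (a, b - 1) = none then (1 : Nat) else 0) = 0 := by
              rw [hmono1 (a, b - 1) w1 hw1]; simp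
            have e2 : (if memo1.get? (a - 1, b) = none then (1 : Nat) else 0) = 0 := by
              rw [hmono1 (a - 1, b) w2 hw2]; simp
            have e3 : (if memo1.get? (a - 1, b - 1) = none then (1 : Nat) else 0) = 0 := by
              rw [hget1]; simp
            unfold pvMissing
            omega
          obtain ⟨f2, memo2, heq2, hf2lo, hf2hi, hg2, hmono2, hnew2, hget2⟩ :=
            iht memo1 rest f1 hg1 hnone1 hm1 (by omega)
          exact ⟨f2, memo2, by rw [hstep, heq1, heq2], by omega, by omega, hg2,
            pvMono_trans hmono1 hmono2, pvNew_trans hnew1 hnew2 (by omega) le_rfl, hget2⟩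
        · -- all three dependencies already memoized
          have hm0 : pvMissing memo a b ≤ t := by
            unfold pvMissing
            rw [if_neg h1, if_neg h2, if_neg h3]
            omega
          exact pvOut_weaken wz tk a b memo rest f _ _
            (iht memo rest f hg hnone hm0 (by omega)) (by omega)

-- in-memo cells and the two base cases of the recurrence resolve in one iteration
theorem pvOut_base (wz tk : String) (a b : Int) (memo : PySem.Dict (Int × Int) Int)
    (rest : List (Int × Int)) (f : Nat) (hg : pvGood wz tk memo) (hf : 1 ≤ f)
    (h : (memo.get? (a, b)).isSome = true ∨ b ≤ 0 ∨ a ≤ 0) :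
    pvOut wz tk a b memo rest f 1 := by
  obtain ⟨f0, rfl⟩ : ∃ f0, f = f0 + 1 := ⟨f - 1, by omega⟩
  cases hq : memo.get? (a, b) with
  | some v => exact pvOut_of_mem wz tk a b rest memo f0 v hq hg
  | none =>
    have h' : b ≤ 0 ∨ (¬ b ≤ 0 ∧ a ≤ 0) := by
      rcases h with h | h | h
      · rw [hq] at h; cases h
      · exact Or.inl h
      · by_cases hb : b ≤ 0
        · exact Or.inl hb
        · exact Or.inr ⟨hb, h⟩
    rcases h' with hb | ⟨hb, ha⟩
    · apply pvOut_of_insert wz tk a b rest memo f0 a hq hg (cSpec_b_le wz tk a b hb).symm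
      rw [bLoop_succ, if_neg (by rw [hq]; simp), if_pos hb]
    · apply pvOut_of_insert wz tk a b rest memo f0 0 hq hg (cSpec_a_le wz tk a b hb ha).symm
      rw [bLoop_succ, if_neg (by rw [hq]; simp), if_neg hb, if_pos ha]

-- every cell resolves within bFuel of its measure
theorem pvResolve (wz tk : String) : ∀ k : Nat, ∀ a b : Int, a.toNat + b.toNat ≤ k →
    ∀ memo rest f, pvGood wz tk memo → bFuel k ≤ f → pvOut wz tk a b memo rest f (bFuel k) := by
  intro k
  induction k with
  | zero =>
    intro a b hm memo rest f hg hf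
    have hb : b ≤ 0 := by omega
    exact pvOut_base wz tk a b memo rest f hg (le_trans (bFuel_pos 0) hf) (Or.inr (Or.inl hb))
  | succ k ih =>
    intro a b hm memo rest f hg hf
    by_cases hbase : (memo.get? (a, b)).isSome = true ∨ b ≤ 0 ∨ a ≤ 0
    · exact pvOut_weaken wz tk a b memo rest f 1 _
        (pvOut_base wz tk a b memo rest f hg (le_trans (bFuel_pos _) hf) hbase) (bFuel_pos _)
    · push Not at hbase
      obtain ⟨hsome, hb, ha⟩ := hbase
      have hnone : memo.get? (a, b) = none := by
        cases hq : memo.get? (a, b) with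
        | none => rfl
        | some v => exact absurd (by rw [hq]; rfl) hsome
      have hmiss : pvMissing memo a b ≤ 3 := by unfold pvMissing; split_ifs <;> omega
      have hup : pvUsed k 3 = bFuel (k + 1) := by
        have h1 : pvUsed k 3 = bFuel k + 1 + (bFuel k + 1 + (bFuel k + 1 + 1)) := rfl
        have h2 : bFuel (k + 1) = 3 * bFuel k + 4 := rfl
        omega
      have := pvVisits wz tk k ih a b (by omega) (by omega) hm 3 memo rest f hg hnone hmiss
        (by rw [hup]; exact hf)
      rw [hup] at this
      exact this

theorem bLoop_run (wz tk : String) (a b : Int) (memo : PySem.Dict (Int × Int) Int)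
    (hg : pvGood wz tk memo) :
    pvGood wz tk (bLoop wz tk (bFuel (a.toNat + b.toNat)) [(a, b)] memo)
    ∧ (bLoop wz tk (bFuel (a.toNat + b.toNat)) [(a, b)] memo).getD (a, b) 0 = cSpec wz tk a b := by
  obtain ⟨f', memo', heq, -, -, hgood, -, -, hget⟩ :=
    pvResolve wz tk (a.toNat + b.toNat) a b le_rfl memo [] (bFuel _) hg le_rfl
  rw [heq, bLoop_nil]
  exact ⟨hgood, by rw [PySem.Dict.getD_eq_get?_getD, hget]; rfl⟩

-- the last_row comprehension of B
theorem pvAltFold (wz tk : String) (a : Int) : ∀ J : Nat,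
    pvGood wz tk (((PySem.List.pyRange 0 (J : Int) 1).foldl (bStep wz tk a) (PySem.Dict.empty, [])).1)
    ∧ ((PySem.List.pyRange 0 (J : Int) 1).foldl (bStep wz tk a) (PySem.Dict.empty, [])).2
      = (List.range J).map (fun m : Nat => cSpec wz tk a (m : Int)) := by
  intro J
  induction J with
  | zero =>
    rw [show ((0 : Nat) : Int) = 0 from rfl, PySem.List.pyRange_one_eq_nil (by omega)]
    refine ⟨?_, by simp⟩
    intro key v h
    rw [List.foldl_nil] at h
    simp [PySem.Dict.get?_empty] at h
  | succ J ih =>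
    obtain ⟨hgood, hlist⟩ := ih
    have hc : ((J + 1 : Nat) : Int) = (J : Int) + 1 := by push_cast; ring
    rw [hc, PySem.List.pyRange_one_succ_right (by omega), List.foldl_append, List.foldl_cons,
      List.foldl_nil]
    have hrun := bLoop_run wz tk a (J : Int)
      (((PySem.List.pyRange 0 (J : Int) 1).foldl (bStep wz tk a) (PySem.Dict.empty, [])).1) hgood
    rw [Int.toNat_natCast] at hrun
    constructor
    · exact hrun.1
    · show (((PySem.List.pyRange 0 (J : Int) 1).foldl (bStep wz tk a) (PySem.Dict.empty, [])).2
        ++ [_]) = _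
      rw [hlist, List.range_succ, List.map_append, List.map_cons, List.map_nil]
      congr 1
      rw [show ((J : Int)).toNat = J from Int.toNat_natCast J]
      rw [hrun.2]

-- ===== A-side machinery: A's matrix program reduced to a rolling row pvBrow =====

-- step expression of A's inner loop
def pvE (wz tk : String) (n : Int) (row prev : List Int) (m : Int) : Int :=
  min (min (1 + PySem.List.pyGetD row (m - 1) 0) (1 + PySem.List.pyGetD prev m 0))
      (PySem.List.pyGetD prev (m - 1) 0 +
        (if (PySem.Str.pyGet? wz n).getD ' ' ≠ (PySem.Str.pyGet? tk m).getD ' ' then 1 else 0))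

-- A's inner loop as a function of n and the previous row
def pvInner (wz tk : String) (j n : Int) (prev : List Int) : List Int :=
  (PySem.List.pyRange 1 j 1).foldl
    (fun row m => PySem.List.pySetD row m (pvE wz tk n row prev m))
    (n :: List.replicate (j - 1).toNat 0)

-- the DP row after k outer iterations
def pvBrow (wz tk : String) (j : Int) : Nat → List Int
  | 0 => List.replicate j.toNat 0
  | k + 1 => pvInner wz tk j ((k : Int) + 1) (pvBrow wz tk j k)

-- the initial row t of A's matrix after the "D[n][0] = n" loop
def pvRow0 (j : Int) (t : Int) : List Int :=
  PySem.List.pySetD (List.replicate j.toNat (0 : Int)) 0 t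

-- first component of a paired fold whose first component does not depend on the second
theorem pv_foldl_fst {α β γ : Type} (ms : List α) (step : β × γ → α → β × γ) (F : β → α → β)
    (h : ∀ p x, (step p x).1 = F p.1 x) :
    ∀ (d : β) (r : γ), (ms.foldl step (d, r)).1 = ms.foldl F d := by
  induction ms with
  | nil => intro d r; rfl
  | cons a t ih =>
    intro d r
    have hs : step (d, r) a = ((step (d, r) a).1, (step (d, r) a).2) := rfl
    rw [List.foldl_cons, List.foldl_cons, hs, h, ih]

theorem pv_set_getD_self {ρ : Type} (d : ρ) : ∀ (D : List ρ) (n : Nat), D.set n (D.getD n d) = D := by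
  intro D
  induction D with
  | nil => intro n; rfl
  | cons x xs ih =>
    intro n
    cases n with
    | zero => simp [List.getD]
    | succ n => simpa [List.getD, List.set] using ih n

theorem pv_map_const {α β : Type} (c : β) : ∀ (l : List α), l.map (fun _ => c) = List.replicate l.length c := by
  intro l; induction l with
  | nil => rfl
  | cons a t ih => simp [List.replicate, ih]

theorem pv_aget_eq {r : Type} (xs : Array r) (n : Nat) (d : r) :
    pvAGet xs (n : Int) d = xs.toList.getD n d := by
  simp only [pvAGet, Int.toNat_natCast]
  rw [List.getD_eq_getElem?_getD, Array.getD]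
  split
  · next h => rw [List.getElem?_eq_getElem (by simpa using h)]; simp
  · next h => rw [List.getElem?_eq_none (by simpa using h)]; rfl

theorem pv_aset_toList {r : Type} (xs : Array r) (n : Nat) (v : r) :
    (pvASet xs (n : Int) v).toList = xs.toList.set n v := by
  simp [pvASet]

theorem pv_asize {r : Type} (xs : Array r) (i : Int) (v : r) :
    (pvASet xs i v).size = xs.size := by
  simp [pvASet]

theorem pv_aget_aset {r : Type} (D : Array r) (n m : Nat) (v d : r) (h : n < D.size) :
    pvAGet (pvASet D (n : Int) v) (m : Int) d = if m = n then v else pvAGet D (m : Int) d := by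
  have hpy := PySem.List.pyGetD_pySetD_natCast D.toList n m v d (by simpa using h)
  rw [PySem.List.pySetD_natCast, PySem.List.pyGetD_natCast, PySem.List.pyGetD_natCast] at hpy
  rw [pv_aget_eq, pv_aget_eq]
  have : (pvASet D (n : Int) v).toList = D.toList.set n v := pv_aset_toList D n v
  rw [this, hpy]

theorem pv_aset_self {r : Type} (D : Array r) (n : Nat) (d : r) :
    pvASet D (n : Int) (pvAGet D (n : Int) d) = D := by
  apply Array.toList_inj.mp
  rw [pv_aset_toList, pv_aget_eq, pv_set_getD_self]

theorem pv_aset_aset {r : Type} (D : Array r) (n : Nat) (v w : r) :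
    pvASet (pvASet D (n : Int) v) (n : Int) w = pvASet D (n : Int) w := by
  apply Array.toList_inj.mp
  rw [pv_aset_toList, pv_aset_toList, pv_aset_toList, List.set_set]

theorem pv_inner_commute (E : List Int → List Int → Int → Int) :
    ∀ (ms : List Int) (D : Array (List Int)) (n : Nat), n < D.size → 1 ≤ n →
    ms.foldl (fun D m => pvASet D (n : Int)
        (PySem.List.pySetD (pvAGet D (n : Int) []) m
          (E (pvAGet D (n : Int) []) (pvAGet D ((n : Int) - 1) []) m))) D
      = pvASet D (n : Int)
          (ms.foldl (fun row m => PySem.List.pySetD row m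
              (E row (pvAGet D ((n : Int) - 1) []) m))
            (pvAGet D (n : Int) [])) := by
  intro ms
  induction ms with
  | nil =>
    intro D n hn h1
    rw [List.foldl_nil, List.foldl_nil, pv_aset_self]
  | cons a t ih =>
    intro D n hn h1
    have hcast : ((n : Int) - 1) = ((n - 1 : Nat) : Int) := by omega
    rw [List.foldl_cons, List.foldl_cons]
    rw [ih _ n (by rw [pv_asize]; exact hn) h1]
    have hget : pvAGet (pvASet D (n : Int)
        (PySem.List.pySetD (pvAGet D (n : Int) []) a
          (E (pvAGet D (n : Int) []) (pvAGet D ((n : Int) - 1) []) a))) (n : Int) []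
        = PySem.List.pySetD (pvAGet D (n : Int) []) a
          (E (pvAGet D (n : Int) []) (pvAGet D ((n : Int) - 1) []) a) := by
      rw [pv_aget_aset _ _ _ _ _ hn, if_pos rfl]
    have hprev : pvAGet (pvASet D (n : Int)
        (PySem.List.pySetD (pvAGet D (n : Int) []) a
          (E (pvAGet D (n : Int) []) (pvAGet D ((n : Int) - 1) []) a))) ((n : Int) - 1) []
        = pvAGet D ((n : Int) - 1) [] := by
      rw [hcast, pv_aget_aset _ _ _ _ _ hn, if_neg (by omega)]
    rw [hget, hprev, pv_aset_aset]

theorem pv_row0_cons (j : Int) (hj : 1 ≤ j) (t : Int) :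
    pvRow0 j t = t :: List.replicate (j - 1).toNat 0 := by
  unfold pvRow0
  rw [PySem.List.pySetD_of_nonneg _ _ (by omega)]
  have : j.toNat = (j - 1).toNat + 1 := by omega
  rw [this, List.replicate_succ]
  rfl

theorem pv_row0_zero (j : Int) : pvRow0 j 0 = List.replicate j.toNat 0 := by
  unfold pvRow0
  rw [PySem.List.pySetD_of_nonneg _ _ (by omega)]
  cases h : j.toNat with
  | zero => rfl
  | succ n => simp [List.replicate_succ]

theorem pv_setup (z : List Int) (I : Nat) : ∀ k : Nat, k ≤ I →
    (((PySem.List.pyRange 0 (k : Int) 1).foldl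
        (fun D n => pvASet D n (PySem.List.pySetD (pvAGet D n []) 0 n))
        (List.replicate I z).toArray).size = I)
    ∧ (∀ t : Nat, t < I →
        pvAGet ((PySem.List.pyRange 0 (k : Int) 1).foldl
          (fun D n => pvASet D n (PySem.List.pySetD (pvAGet D n []) 0 n))
          (List.replicate I z).toArray) (t : Int) []
        = if t < k then PySem.List.pySetD z 0 (t : Int) else z) := by
  intro k
  induction k with
  | zero =>
    intro _
    constructor
    · simp [PySem.List.pyRange_one_eq_nil (by omega : (0 : Int) ≤ 0)]
    · intro t ht
      simp [PySem.List.pyRange_one_eq_nil (by omega : (0 : Int) ≤ 0), pv_aget_eq,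
        List.getD_eq_getElem?_getD, ht]
  | succ k ih =>
    intro hk
    have ihh := ih (by omega)
    have hc : ((k + 1 : Nat) : Int) = (k : Int) + 1 := by push_cast; ring
    rw [hc, PySem.List.pyRange_one_succ_right (by omega), List.foldl_append, List.foldl_cons,
      List.foldl_nil]
    have hkI : k < I := by omega
    have hgetk : pvAGet ((PySem.List.pyRange 0 (k : Int) 1).foldl
        (fun D n => pvASet D n (PySem.List.pySetD (pvAGet D n []) 0 n))
        (List.replicate I z).toArray) (k : Int) [] = z := by
      rw [ihh.2 k hkI, if_neg (by omega)]
    rw [hgetk]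
    constructor
    · rw [pv_asize, ihh.1]
    · intro t ht
      rw [pv_aget_aset _ _ _ _ _ (by rw [ihh.1]; exact hkI)]
      by_cases h : t = k
      · rw [if_pos h, if_pos (by omega), h]
      · rw [if_neg h, ihh.2 t ht]
        by_cases h2 : t < k
        · rw [if_pos h2, if_pos (by omega)]
        · rw [if_neg h2, if_neg (by omega)]

theorem pv_main (wz tk : String) (j : Int) (hj : 1 ≤ j) (I : Nat) (D0 : Array (List Int))
    (hlen : D0.size = I)
    (hrow : ∀ t : Nat, t < I → pvAGet D0 (t : Int) [] = pvRow0 j (t : Int)) :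
    ∀ k : Nat, k < I →
      (((PySem.List.pyRange 1 (1 + (k : Int)) 1).foldl
          (fun D n => (PySem.List.pyRange 1 j 1).foldl
            (fun D m => pvASet D n
              (PySem.List.pySetD (pvAGet D n []) m
                (pvE wz tk n (pvAGet D n []) (pvAGet D (n - 1) []) m))) D)
          D0).size = I)
      ∧ (∀ t : Nat, t < I →
          pvAGet ((PySem.List.pyRange 1 (1 + (k : Int)) 1).foldl
            (fun D n => (PySem.List.pyRange 1 j 1).foldl
              (fun D m => pvASet D n
                (PySem.List.pySetD (pvAGet D n []) m
                  (pvE wz tk n (pvAGet D n []) (pvAGet D (n - 1) []) m))) D)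
            D0) (t : Int) []
          = if t ≤ k then pvBrow wz tk j t else pvRow0 j (t : Int)) := by
  intro k
  induction k with
  | zero =>
    intro h0
    have hnil : PySem.List.pyRange 1 ((1 : Int) + ((0 : Nat) : Int)) 1 = [] := by
      apply PySem.List.pyRange_one_eq_nil; omega
    rw [hnil]
    refine ⟨hlen, ?_⟩
    intro t ht
    rw [List.foldl_nil, hrow t ht]
    by_cases h : t = 0
    · subst h
      rw [if_pos (by omega)]
      show pvRow0 j 0 = pvBrow wz tk j 0
      rw [pv_row0_zero]
      rfl
    · rw [if_neg (by omega)]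
  | succ k ih =>
    intro hk1
    have ihh := ih (by omega)
    have hc : (1 : Int) + ((k + 1 : Nat) : Int) = (1 + (k : Int)) + 1 := by push_cast; ring
    rw [hc, PySem.List.pyRange_one_succ_right (by omega), List.foldl_append, List.foldl_cons,
      List.foldl_nil]
    have hc2 : (1 : Int) + (k : Int) = ((k + 1 : Nat) : Int) := by push_cast; ring
    rw [hc2] at ihh ⊢
    generalize hR : ((PySem.List.pyRange 1 ((k + 1 : Nat) : Int) 1).foldl
        (fun D n => (PySem.List.pyRange 1 j 1).foldl
          (fun D m => pvASet D n
            (PySem.List.pySetD (pvAGet D n []) m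
              (pvE wz tk n (pvAGet D n []) (pvAGet D (n - 1) []) m))) D)
        D0) = R at ihh ⊢
    have hRlen : R.size = I := ihh.1
    have hcomm := pv_inner_commute (pvE wz tk ((k + 1 : Nat) : Int))
      (PySem.List.pyRange 1 j 1) R (k + 1) (by omega) (by omega)
    rw [hcomm]
    have hgetn : pvAGet R ((k + 1 : Nat) : Int) [] = pvRow0 j ((k + 1 : Nat) : Int) := by
      rw [ihh.2 (k + 1) hk1, if_neg (by omega)]
    have hgetp : pvAGet R (((k + 1 : Nat) : Int) - 1) [] = pvBrow wz tk j k := by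
      have : (((k + 1 : Nat) : Int) - 1) = (k : Int) := by push_cast; ring
      rw [this, ihh.2 k (by omega), if_pos (by omega)]
    rw [hgetn, hgetp, pv_row0_cons j hj]
    have hinner : (PySem.List.pyRange 1 j 1).foldl
        (fun row m => PySem.List.pySetD row m (pvE wz tk ((k + 1 : Nat) : Int) row (pvBrow wz tk j k) m))
        (((k + 1 : Nat) : Int) :: List.replicate (j - 1).toNat 0)
        = pvBrow wz tk j (k + 1) := by
      show _ = pvInner wz tk j ((k : Int) + 1) (pvBrow wz tk j k)
      have : ((k + 1 : Nat) : Int) = (k : Int) + 1 := by push_cast; ring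
      rw [this]
      rfl
    rw [hinner]
    constructor
    · rw [pv_asize, hRlen]
    · intro t ht
      rw [pv_aget_aset _ _ _ _ _ (by omega : k + 1 < R.size)]
      by_cases h : t = k + 1
      · rw [if_pos h, if_pos (by omega), h]
      · rw [if_neg h, ihh.2 t ht]
        by_cases h2 : t ≤ k
        · rw [if_pos h2, if_pos (by omega)]
        · rw [if_neg h2, if_neg (by omega)]

theorem pv_extract (L : List Int) (hL : L ≠ []) :
    PySem.List.pyGetD L
      (((PySem.List.index? L ((PySem.List.min? L (fun x => x)).getD 0)).getD 0 : Nat) : Int) 0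
    = (PySem.List.min? L (fun x => x)).getD 0 := by
  cases hm : PySem.List.min? L (fun x => x) with
  | none => exact absurd ((PySem.List.min?_eq_none_iff L _).mp hm) hL
  | some m =>
    have hmem : m ∈ L := PySem.List.min?_mem hm
    have hsome : (PySem.List.index? L m).isSome := (PySem.List.index?_isSome_iff L m).mpr hmem
    cases hk : PySem.List.index? L m with
    | none => rw [hk] at hsome; simp at hsome
    | some k =>
      obtain ⟨hklen, hval, -⟩ := PySem.List.getElem_of_index?_eq_some hk
      simp only [Option.getD_some, hk]
      rw [PySem.List.pyGetD_natCast, List.getD_eq_getElem?_getD, List.getElem?_eq_getElem hklen]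
      simpa using hval

-- A's / B's result, factored for congruence (definitionally the ports' final pieces)
def pvAFinish (L : List Int) : Int × Int :=
  (PySem.List.pyGetD L
    (((PySem.List.index? L ((PySem.List.min? L (fun x => x)).getD 0)).getD 0 : Nat) : Int) 0,
   ((PySem.List.index? L ((PySem.List.min? L (fun x => x)).getD 0)).getD 0 : Nat))

def pvBFinish (L : List Int) : Int × Int :=
  ((PySem.List.min? L (fun x => x)).getD 0,
   ((PySem.List.index? L ((PySem.List.min? L (fun x => x)).getD 0)).getD 0 : Nat))

def pvABig (wzorzec : String) (i : Int) (tekst : String) (j : Int) : List Int :=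
  let D : Array (List Int) :=
    ((PySem.List.pyRange 0 i 1).map (fun _ => (PySem.List.pyRange 0 j 1).map (fun _ => (0 : Int)))).toArray
  let r : Array (List Char) :=
    ((PySem.List.pyRange 0 i 1).map (fun _ => (PySem.List.pyRange 0 j 1).map (fun _ => 'X'))).toArray
  let r := (PySem.List.pyRange 0 i 1).foldl (fun r n =>
      (PySem.List.pyRange 0 j 1).foldl (fun r m =>
        if n ≠ 0 ∧ m = 0 then
          pvASet r n (PySem.List.pySetD (pvAGet r n []) m 'D')
        else r) r) r
  let D := (PySem.List.pyRange 0 i 1).foldl (fun D n =>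
      pvASet D n (PySem.List.pySetD (pvAGet D n []) 0 n)) D
  let Dr := (PySem.List.pyRange 1 i 1).foldl (fun Dr n =>
      (PySem.List.pyRange 1 j 1).foldl (fun Dr m =>
        let koszt_wstawienia : Int :=
          1 + PySem.List.pyGetD (pvAGet Dr.1 n []) (m - 1) 0
        let koszt_usuniecia : Int :=
          1 + PySem.List.pyGetD (pvAGet Dr.1 (n - 1) []) m 0
        let koszt_wymiany : Int :=
          PySem.List.pyGetD (pvAGet Dr.1 (n - 1) []) (m - 1) 0 +
            (if (PySem.Str.pyGet? wzorzec n).getD ' ' ≠ (PySem.Str.pyGet? tekst m).getD ' '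
             then 1 else 0)
        let min_koszt := min (min koszt_wstawienia koszt_usuniecia) koszt_wymiany
        let D' := pvASet Dr.1 n
          (PySem.List.pySetD (pvAGet Dr.1 n []) m min_koszt)
        let r' :=
          if min_koszt = koszt_wstawienia then
            pvASet Dr.2 n (PySem.List.pySetD (pvAGet Dr.2 n []) m 'I')
          else if min_koszt = koszt_usuniecia then
            pvASet Dr.2 n (PySem.List.pySetD (pvAGet Dr.2 n []) m 'D')
          else if min_koszt = PySem.List.pyGetD (pvAGet Dr.1 (n - 1) []) (m - 1) 0 then
            pvASet Dr.2 n (PySem.List.pySetD (pvAGet Dr.2 n []) m 'M')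
          else
            pvASet Dr.2 n (PySem.List.pySetD (pvAGet Dr.2 n []) m 'S')
        (D', r')) Dr) (D, r)
  pvAGet Dr.1 (i - 1) []

-- the D-component of A's main paired (D, r) loop ignores r
theorem pv_outer_fst (wz tk : String) (j : Int) (ms : List Int)
    (d : Array (List Int)) (r : Array (List Char)) :
    (ms.foldl (fun Dr n =>
      (PySem.List.pyRange 1 j 1).foldl (fun Dr m =>
        (pvASet Dr.1 n
            (PySem.List.pySetD (pvAGet Dr.1 n []) m
              (min
                (min (1 + PySem.List.pyGetD (pvAGet Dr.1 n []) (m - 1) 0)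
                  (1 + PySem.List.pyGetD (pvAGet Dr.1 (n - 1) []) m 0))
                (PySem.List.pyGetD (pvAGet Dr.1 (n - 1) []) (m - 1) 0 +
                  if (PySem.Str.pyGet? wz n).getD ' ' ≠ (PySem.Str.pyGet? tk m).getD ' ' then 1 else 0))),
          if
              min
                  (min (1 + PySem.List.pyGetD (pvAGet Dr.1 n []) (m - 1) 0)
                    (1 + PySem.List.pyGetD (pvAGet Dr.1 (n - 1) []) m 0))
                  (PySem.List.pyGetD (pvAGet Dr.1 (n - 1) []) (m - 1) 0 +
                    if (PySem.Str.pyGet? wz n).getD ' ' ≠ (PySem.Str.pyGet? tk m).getD ' ' then 1 else 0) =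
                1 + PySem.List.pyGetD (pvAGet Dr.1 n []) (m - 1) 0 then
            pvASet Dr.2 n (PySem.List.pySetD (pvAGet Dr.2 n []) m 'I')
          else
            if
                min
                    (min (1 + PySem.List.pyGetD (pvAGet Dr.1 n []) (m - 1) 0)
                      (1 + PySem.List.pyGetD (pvAGet Dr.1 (n - 1) []) m 0))
                    (PySem.List.pyGetD (pvAGet Dr.1 (n - 1) []) (m - 1) 0 +
                      if (PySem.Str.pyGet? wz n).getD ' ' ≠ (PySem.Str.pyGet? tk m).getD ' ' then 1
                      else 0) =
                  1 + PySem.List.pyGetD (pvAGet Dr.1 (n - 1) []) m 0 then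
              pvASet Dr.2 n (PySem.List.pySetD (pvAGet Dr.2 n []) m 'D')
            else
              if
                  min
                      (min (1 + PySem.List.pyGetD (pvAGet Dr.1 n []) (m - 1) 0)
                        (1 + PySem.List.pyGetD (pvAGet Dr.1 (n - 1) []) m 0))
                      (PySem.List.pyGetD (pvAGet Dr.1 (n - 1) []) (m - 1) 0 +
                        if (PySem.Str.pyGet? wz n).getD ' ' ≠ (PySem.Str.pyGet? tk m).getD ' ' then 1
                        else 0) =
                    PySem.List.pyGetD (pvAGet Dr.1 (n - 1) []) (m - 1) 0 then
                pvASet Dr.2 n (PySem.List.pySetD (pvAGet Dr.2 n []) m 'M')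
              else pvASet Dr.2 n (PySem.List.pySetD (pvAGet Dr.2 n []) m 'S')))
        Dr) (d, r)).1
    = ms.foldl (fun D n =>
        (PySem.List.pyRange 1 j 1).foldl (fun D m =>
          pvASet D n
            (PySem.List.pySetD (pvAGet D n []) m
              (pvE wz tk n (pvAGet D n []) (pvAGet D (n - 1) []) m))) D) d := by
  apply pv_foldl_fst
  intro p x
  obtain ⟨d', r'⟩ := p
  exact pv_foldl_fst _ _ _ (fun q mm => rfl) d' r'

theorem pv_ABig_eq (wz tk : String) (I J : Nat) (hI : 1 ≤ I) (hJ : 1 ≤ J) :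
    pvABig wz (I : Int) tk (J : Int) = pvBrow wz tk (J : Int) (I - 1) := by
  simp only [pvABig, pv_map_const, PySem.List.length_pyRange_one, sub_zero, Int.toNat_natCast]
  rw [pv_outer_fst]
  have hset := pv_setup (List.replicate J (0 : Int)) I I le_rfl
  generalize hS : (PySem.List.pyRange 0 (I : Int) 1).foldl
      (fun D n => pvASet D n (PySem.List.pySetD (pvAGet D n []) 0 n))
      (List.replicate I (List.replicate J 0)).toArray = S at hset ⊢
  have hrow : ∀ t : Nat, t < I → pvAGet S (t : Int) [] = pvRow0 (J : Int) (t : Int) := by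
    intro t ht
    rw [hset.2 t ht, if_pos ht]
    simp [pvRow0]
  have hmain := pv_main wz tk (J : Int) (by exact_mod_cast hJ) I S hset.1 hrow (I - 1) (by omega)
  have hI' : (I : Int) = 1 + ((I - 1 : Nat) : Int) := by omega
  rw [hI']
  rw [show (1 : Int) + ((I - 1 : Nat) : Int) - 1 = ((I - 1 : Nat) : Int) from by ring]
  rw [hmain.2 (I - 1) (by omega), if_pos le_rfl]

theorem pv_A_eq (wz tk : String) (I J : Nat) (hI : 1 ≤ I) (hJ : 1 ≤ J) :
    PD_podciagi wz (I : Int) tk (J : Int) = pvAFinish (pvBrow wz tk (J : Int) (I - 1)) := by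
  have h0 : PD_podciagi wz (I : Int) tk (J : Int)
      = pvAFinish (pvABig wz (I : Int) tk (J : Int)) := rfl
  rw [h0, pv_ABig_eq wz tk I J hI hJ]

-- ===== link: pvBrow rows are cSpec values =====

theorem pvGetD_map_range (f : Nat → Int) (J m : Nat) (hm : m < J) :
    PySem.List.pyGetD ((List.range J).map f) (m : Int) 0 = f m := by
  rw [PySem.List.pyGetD_natCast, List.getD_eq_getElem?_getD]
  rw [List.getElem?_eq_getElem (by simpa using hm)]
  simp

theorem pvInner_spec (wz tk : String) (J : Nat) (hJ : 1 ≤ J) (n : Int) (hn : 1 ≤ n)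
    (prev : List Int)
    (hprev : ∀ m : Nat, m < J → PySem.List.pyGetD prev (m : Int) 0 = cSpec wz tk (n - 1) (m : Int)) :
    pvInner wz tk (J : Int) n prev = (List.range J).map (fun m : Nat => cSpec wz tk n (m : Int)) := by
  have main : ∀ t : Nat, 1 ≤ t → t ≤ J →
      (((PySem.List.pyRange 1 (t : Int) 1).foldl
          (fun row m => PySem.List.pySetD row m (pvE wz tk n row prev m))
          (n :: List.replicate ((J : Int) - 1).toNat 0)).length = J)
      ∧ (∀ m : Nat, m < J →
          PySem.List.pyGetD ((PySem.List.pyRange 1 (t : Int) 1).foldl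
            (fun row m => PySem.List.pySetD row m (pvE wz tk n row prev m))
            (n :: List.replicate ((J : Int) - 1).toNat 0)) (m : Int) 0
          = if m < t then cSpec wz tk n (m : Int) else 0) := by
    intro t
    induction t with
    | zero => intro h; omega
    | succ t iht =>
      intro _ htJ
      by_cases ht0 : t = 0
      · subst ht0
        rw [show ((0 + 1 : Nat) : Int) = 1 from rfl,
          PySem.List.pyRange_one_eq_nil (by omega), List.foldl_nil]
        constructor
        · simp; omega
        · intro m hm
          by_cases hm0 : m = 0
          · subst hm0
            rw [if_pos (by omega), show ((0 : Nat) : Int) = 0 from rfl,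
              cSpec_b_le wz tk n 0 (by omega)]
            simp [PySem.List.pyGetD_of_nonneg]
          · obtain ⟨m', rfl⟩ : ∃ m', m = m' + 1 := ⟨m - 1, by omega⟩
            rw [if_neg (by omega), PySem.List.pyGetD_natCast]
            simp [List.getD_eq_getElem?_getD, List.getElem?_replicate]
            split <;> rfl
      · have ht1 : 1 ≤ t := by omega
        have ihh := iht ht1 (by omega)
        have hc : ((t + 1 : Nat) : Int) = (t : Int) + 1 := by push_cast; ring
        rw [hc, PySem.List.pyRange_one_succ_right (by omega : (1 : Int) ≤ (t : Int)),
          List.foldl_append, List.foldl_cons, List.foldl_nil]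
        generalize hR : (PySem.List.pyRange 1 (t : Int) 1).foldl
            (fun row m => PySem.List.pySetD row m (pvE wz tk n row prev m))
            (n :: List.replicate ((J : Int) - 1).toNat 0) = R at ihh ⊢
        obtain ⟨hlen, hvals⟩ := ihh
        have htJ' : t < J := by omega
        have hval : pvE wz tk n R prev (t : Int) = cSpec wz tk n (t : Int) := by
          unfold pvE
          have hcm : ((t : Int) - 1) = ((t - 1 : Nat) : Int) := by omega
          rw [hcm, hvals (t - 1) (by omega), if_pos (by omega), hprev t htJ',
            hprev (t - 1) (by omega), cSpec_rec wz tk n (t : Int) (by omega) (by omega), hcm]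
          simp [pvChi]
        constructor
        · rw [PySem.List.length_pySetD]; exact hlen
        · intro m hm
          rw [PySem.List.pyGetD_pySetD_natCast R t m (pvE wz tk n R prev (t : Int)) 0
            (by rw [hlen]; exact htJ')]
          by_cases hmt : m = t
          · rw [if_pos hmt, if_pos (by omega), hmt, hval]
          · rw [if_neg hmt, hvals m hm]
            by_cases hlt : m < t
            · rw [if_pos hlt, if_pos (by omega)]
            · rw [if_neg hlt, if_neg (by omega)]
  obtain ⟨hlen, hvals⟩ := main J hJ le_rfl
  unfold pvInner
  apply List.ext_getElem (by rw [hlen]; simp)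
  intro m h1 h2
  have hv := hvals m (by rw [← hlen]; exact h1)
  rw [if_pos (by rw [← hlen]; exact h1), PySem.List.pyGetD_natCast,
    List.getD_eq_getElem?_getD, List.getElem?_eq_getElem h1] at hv
  simp only [Option.getD_some] at hv
  rw [List.getElem_map, List.getElem_range, hv]

theorem pvBrow_map (wz tk : String) (J : Nat) (hJ : 1 ≤ J) :
    ∀ k : Nat, pvBrow wz tk (J : Int) k = (List.range J).map (fun m : Nat => cSpec wz tk (k : Int) (m : Int)) := by
  intro k
  induction k with
  | zero =>
    show List.replicate ((J : Int)).toNat 0 = _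
    rw [Int.toNat_natCast]
    apply List.ext_getElem (by simp)
    intro m h1 h2
    rw [List.getElem_replicate, List.getElem_map, List.getElem_range]
    by_cases hm : m = 0
    · subst hm
      rw [show ((0 : Nat) : Int) = 0 from rfl, cSpec_b_le wz tk _ _ (by omega)]
    · rw [cSpec_a_le wz tk _ _ (by simp at h1; omega) (by omega)]
  | succ k ih =>
    show pvInner wz tk (J : Int) ((k : Int) + 1) (pvBrow wz tk (J : Int) k) = _
    rw [ih]
    rw [pvInner_spec wz tk J hJ ((k : Int) + 1) (by omega)
      ((List.range J).map (fun m : Nat => cSpec wz tk (k : Int) (m : Int)))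
      (by
        intro m hm
        rw [pvGetD_map_range _ J m hm]
        rw [show (k : Int) + 1 - 1 = (k : Int) from by ring])]
    have hc : ((k + 1 : Nat) : Int) = (k : Int) + 1 := by push_cast; ring
    rw [hc]

-- ===== VERDICT (by name: the statement is the Claim_ definition above) =====
theorem PD_podciagi_spec : Claim_equal_PD_podciagi := by
  intro wz i tk j _ hpre
  obtain ⟨hi, hj, -⟩ := hpre
  unfold Spec_PD_podciagi
  obtain ⟨I, rfl⟩ : ∃ I : Nat, i = (I : Int) := ⟨i.toNat, by omega⟩
  obtain ⟨J, rfl⟩ : ∃ J : Nat, j = (J : Int) := ⟨j.toNat, by omega⟩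
  have hI : 1 ≤ I := by omega
  have hJ : 1 ≤ J := by omega
  have hA := pv_A_eq wz tk I J hI hJ
  rw [pvBrow_map wz tk J hJ (I - 1)] at hA
  have hfold := pvAltFold wz tk ((I : Int) - 1) J
  have hB : PD_podciagi_alt wz (I : Int) tk (J : Int)
      = pvBFinish (((PySem.List.pyRange 0 (J : Int) 1).foldl
          (bStep wz tk ((I : Int) - 1)) (PySem.Dict.empty, [])).2) := rfl
  rw [hfold.2] at hB
  have hcast : ((I - 1 : Nat) : Int) = (I : Int) - 1 := by omega
  rw [hcast] at hA
  rw [hA, hB]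
  have hne : ((List.range J).map (fun m : Nat => cSpec wz tk ((I : Int) - 1) (m : Int))) ≠ [] := by
    intro h
    have : J = 0 := by simpa using congrArg List.length h
    omega
  unfold pvAFinish pvBFinish
  exact Prod.ext (pv_extract _ hne) rfl
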